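-- pv_equiv track=rewrite | github.com/smitterl/pairwise | filters/pairwise.py | pairwise_covered
-- ===== SOURCE A (Python) =====
-- def pairwise_covered(candidates, line_parts):
--     for i in range(len(line_parts) - 1):
--         for j in range(i + 1, len(line_parts)):
--             cand_i_j = [x for x in candidates if
--                     x[i] == line_parts[i] and
--                     x[j] == line_parts[j]]
--             if not cand_i_j:
--                 return False
--     return True
-- ===== SOURCE B (Python) =====
-- def pairwise_covered(candidates, line_parts):
--     n = len(line_parts)
--     covered = set()
--     for x in candidates:
--         matched = [k for k in range(min(len(x), n)) if x[k] == line_parts[k]]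
--         for ai, i in enumerate(matched):
--             for j in matched[ai + 1:]:
--                 covered.add((i, j))
--     return all((i, j) in covered for i in range(n - 1) for j in range(i + 1, n))
-- ===== Notes on version B (the rewrite author's own statement) =====
-- stated objective: alternative
-- what changed: Instead of rescanning all candidates for every position pair, B makes one pass over candidates building a set of covered (i,j) pairs from each candidate's matched positions, then checks all required pairs against that set.
import Mathlib
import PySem

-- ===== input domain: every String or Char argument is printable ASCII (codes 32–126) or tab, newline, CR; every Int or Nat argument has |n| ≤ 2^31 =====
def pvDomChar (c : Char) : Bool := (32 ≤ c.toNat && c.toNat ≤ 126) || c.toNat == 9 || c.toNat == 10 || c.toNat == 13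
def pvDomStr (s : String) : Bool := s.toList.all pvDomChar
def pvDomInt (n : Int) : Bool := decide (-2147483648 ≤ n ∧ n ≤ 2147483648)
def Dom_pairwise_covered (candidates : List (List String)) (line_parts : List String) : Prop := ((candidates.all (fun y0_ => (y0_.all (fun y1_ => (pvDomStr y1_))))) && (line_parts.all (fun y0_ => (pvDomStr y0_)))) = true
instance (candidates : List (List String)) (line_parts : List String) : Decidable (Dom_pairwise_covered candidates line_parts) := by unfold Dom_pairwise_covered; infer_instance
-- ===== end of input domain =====

-- B builds a set of covered position-pairs in one pass over candidates and then checks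
-- completeness, instead of A's per-pair rescan of all candidates (alternative decomposition).

-- ===== PORT A =====
-- Indexing uses List.getD; exact within Pre_ (every index the Python evaluates before
-- returning is in range there).
def pairwise_covered (candidates : List (List String)) (line_parts : List String) : Bool :=
  (List.range (line_parts.length - 1)).all (fun i =>
    (List.range' (i + 1) (line_parts.length - (i + 1))).all (fun j =>
      !((candidates.filter (fun x =>
          (x.getD i "" == line_parts.getD i "") &&
          (x.getD j "" == line_parts.getD j ""))).isEmpty)))

-- ===== PORT B =====
-- matched positions of one candidate (Source B's list comprehension over range(min(len(x), n)))
def pvMatched (x line_parts : List String) : List Nat :=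
  (List.range (min x.length line_parts.length)).filter
    (fun k => x.getD k "" == line_parts.getD k "")

-- Source B's nested 'for ai, i in enumerate(matched): for j in matched[ai+1:]' pair generation
def pvAllPairs : List Nat → List (Nat × Nat)
  | [] => []
  | i :: rest => rest.map (fun j => (i, j)) ++ pvAllPairs rest

def pairwise_covered_alt (candidates : List (List String)) (line_parts : List String) : Bool :=
  let n := line_parts.length
  let covered : PySem.Set (Nat × Nat) :=
    candidates.foldl (fun s x => (pvAllPairs (pvMatched x line_parts)).foldl PySem.Set.add s)
      PySem.Set.empty
  (List.range (n - 1)).all (fun i =>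
    (List.range' (i + 1) (n - (i + 1))).all (fun j =>
      PySem.Set.contains covered (i, j)))

-- ===== PRECONDITION & SPEC =====
-- pvBad c lp i j: scanning pair (i,j) raises IndexError in Python A (some candidate is
-- indexed out of range there, respecting the 'and' short-circuit).
def pvBad (candidates : List (List String)) (line_parts : List String) (i j : Nat) : Bool :=
  candidates.any (fun x =>
    decide (x.length ≤ i) ||
    ((x.getD i "" == line_parts.getD i "") && decide (x.length ≤ j)))

-- pvCov c lp i j: some candidate long enough matches line_parts at both positions i and j.
def pvCov (candidates : List (List String)) (line_parts : List String) (i j : Nat) : Bool :=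
  candidates.any (fun x =>
    decide (j < x.length) &&
    (x.getD i "" == line_parts.getD i "") &&
    (x.getD j "" == line_parts.getD j ""))

-- Pre_ excludes EXACTLY the inputs on which Python A raises IndexError: a pair whose
-- candidate scan indexes a too-short candidate is only reached if no lexicographically
-- earlier pair already returned False (was raise-free and uncovered).
def Pre_pairwise_covered (candidates : List (List String)) (line_parts : List String) : Prop :=
  ∀ i ∈ List.range (line_parts.length - 1),
    ∀ j ∈ List.range' (i + 1) (line_parts.length - (i + 1)),
      pvBad candidates line_parts i j = true →
        ∃ i' ∈ List.range (line_parts.length - 1),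
          ∃ j' ∈ List.range' (i' + 1) (line_parts.length - (i' + 1)),
            (i' < i ∨ (i' = i ∧ j' < j)) ∧
            pvBad candidates line_parts i' j' = false ∧
            pvCov candidates line_parts i' j' = false
instance (candidates : List (List String)) (line_parts : List String) : Decidable (Pre_pairwise_covered candidates line_parts) := by unfold Pre_pairwise_covered; infer_instance

def pvWitness_pairwise_covered : List (List String) × List String := ([["a", "b"], ["a", "c"]], ["a", "b"])

def Spec_pairwise_covered (candidates : List (List String)) (line_parts : List String) (out : Bool) : Prop := out = pairwise_covered_alt candidates line_parts
instance (candidates : List (List String)) (line_parts : List String) (out : Bool) : Decidable (Spec_pairwise_covered candidates line_parts out) := by unfold Spec_pairwise_covered; infer_instance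

-- ===== CLAIM (what is proved, stated in full; the proofs are below) =====
def Claim_equal_pairwise_covered : Prop := ∀ (candidates : List (List String)) (line_parts : List String), Dom_pairwise_covered candidates line_parts → Pre_pairwise_covered candidates line_parts → Spec_pairwise_covered candidates line_parts (pairwise_covered candidates line_parts)

-- ===== LEMMAS AND PROOFS =====

theorem mem_foldl_set_add {α : Type} [BEq α] [LawfulBEq α] (ps : List α) (s : PySem.Set α) (y : α) :
    y ∈ ps.foldl PySem.Set.add s ↔ y ∈ s ∨ y ∈ ps := by
  induction ps generalizing s with
  | nil => simp
  | cons p ps ih =>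
      simp [List.foldl_cons, ih, PySem.Set.mem_add]
      tauto

theorem mem_covered (candidates : List (List String)) (line_parts : List String) (y : Nat × Nat) :
    (y ∈ candidates.foldl
        (fun s x => (pvAllPairs (pvMatched x line_parts)).foldl PySem.Set.add s)
        PySem.Set.empty) ↔
      ∃ x ∈ candidates, y ∈ pvAllPairs (pvMatched x line_parts) := by
  suffices h : ∀ (s : PySem.Set (Nat × Nat)),
      (y ∈ candidates.foldl
        (fun s x => (pvAllPairs (pvMatched x line_parts)).foldl PySem.Set.add s) s) ↔
      y ∈ s ∨ ∃ x ∈ candidates, y ∈ pvAllPairs (pvMatched x line_parts) by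
    simpa [PySem.Set.empty] using h PySem.Set.empty
  intro s
  induction candidates generalizing s with
  | nil => simp
  | cons c cs ih =>
      simp [List.foldl_cons, ih, mem_foldl_set_add]
      tauto

theorem mem_pvAllPairs {l : List Nat} (hl : l.Pairwise (· < ·)) (i j : Nat) :
    (i, j) ∈ pvAllPairs l ↔ i ∈ l ∧ j ∈ l ∧ i < j := by
  induction l with
  | nil => simp [pvAllPairs]
  | cons a rest ih =>
      have ha : ∀ b ∈ rest, a < b := (List.pairwise_cons.mp hl).1
      have hrest := (List.pairwise_cons.mp hl).2
      simp only [pvAllPairs, List.mem_append, List.mem_map, List.mem_cons, ih hrest]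
      constructor
      · rintro (⟨b, hb, hab⟩ | ⟨hi, hj, hij⟩)
        · cases hab
          exact ⟨Or.inl rfl, Or.inr hb, ha _ hb⟩
        · exact ⟨Or.inr hi, Or.inr hj, hij⟩
      · rintro ⟨hi | hi, hj | hj, hij⟩
        · omega
        · exact Or.inl ⟨j, hj, by simp [hi]⟩
        · exact absurd (ha _ hi) (by omega)
        · exact Or.inr ⟨hi, hj, hij⟩

theorem pvMatched_pairwise (x line_parts : List String) : (pvMatched x line_parts).Pairwise (· < ·) :=
  List.Pairwise.sublist List.filter_sublist List.pairwise_lt_range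

theorem mem_pvMatched (x line_parts : List String) (k : Nat) :
    k ∈ pvMatched x line_parts ↔
      k < min x.length line_parts.length ∧ (x.getD k "" == line_parts.getD k "") = true := by
  simp [pvMatched, List.mem_filter, List.mem_range]

-- B's covered set contains (i,j) (i<j<n) exactly when pvCov holds
theorem contains_eq_cov (candidates : List (List String)) (line_parts : List String)
    (i j : Nat) (hij : i < j) (hj : j < line_parts.length) :
    PySem.Set.contains
      (candidates.foldl
        (fun s x => (pvAllPairs (pvMatched x line_parts)).foldl PySem.Set.add s)
        PySem.Set.empty) (i, j) = pvCov candidates line_parts i j := by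
  rw [Bool.eq_iff_iff]
  have hc : ∀ (s : PySem.Set (Nat × Nat)) (y : Nat × Nat),
      PySem.Set.contains s y = true ↔ y ∈ s := by
    intro s y; simp [PySem.Set.contains]
  rw [hc, mem_covered]
  simp only [pvCov, List.any_eq_true, Bool.and_eq_true, decide_eq_true_eq]
  constructor
  · rintro ⟨x, hx, hmem⟩
    rw [mem_pvAllPairs (pvMatched_pairwise x line_parts)] at hmem
    obtain ⟨hi, hjm, -⟩ := hmem
    rw [mem_pvMatched] at hi hjm
    exact ⟨x, hx, ⟨by omega, hi.2⟩, hjm.2⟩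
  · rintro ⟨x, hx, ⟨hlen, hi⟩, hjv⟩
    refine ⟨x, hx, ?_⟩
    rw [mem_pvAllPairs (pvMatched_pairwise x line_parts)]
    exact ⟨(mem_pvMatched _ _ _).mpr ⟨by omega, hi⟩,
           (mem_pvMatched _ _ _).mpr ⟨by omega, hjv⟩, hij⟩

-- A's per-pair test agrees with pvCov whenever the pair does not raise in Python
theorem testA_eq_cov (candidates : List (List String)) (line_parts : List String)
    (i j : Nat) (hbad : pvBad candidates line_parts i j = false) :
    (!((candidates.filter (fun x =>
        (x.getD i "" == line_parts.getD i "") &&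
        (x.getD j "" == line_parts.getD j ""))).isEmpty)) = pvCov candidates line_parts i j := by
  rw [Bool.eq_iff_iff]
  simp only [Bool.not_eq_eq_eq_not, Bool.not_true, List.isEmpty_eq_false_iff_exists_mem,
    List.mem_filter, pvCov, List.any_eq_true, Bool.and_eq_true, decide_eq_true_eq]
  simp only [pvBad, List.any_eq_false, Bool.or_eq_false_iff, Bool.and_eq_false_iff,
    decide_eq_false_iff_not, Bool.not_eq_true] at hbad
  constructor
  · rintro ⟨x, hx, h1, h2⟩
    obtain ⟨hli, hor⟩ := hbad x hx
    rcases hor with hne | hlj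
    · exact absurd (hne ▸ h1) Bool.false_ne_true
    · exact ⟨x, hx, ⟨by omega, h1⟩, h2⟩
  · rintro ⟨x, hx, ⟨hlen, h1⟩, h2⟩
    exact ⟨x, hx, h1, h2⟩

-- pvCov always implies A's per-pair test
theorem cov_imp_testA (candidates : List (List String)) (line_parts : List String)
    (i j : Nat) (h : pvCov candidates line_parts i j = true) :
    (!((candidates.filter (fun x =>
        (x.getD i "" == line_parts.getD i "") &&
        (x.getD j "" == line_parts.getD j ""))).isEmpty)) = true := by
  simp only [pvCov, List.any_eq_true, Bool.and_eq_true, decide_eq_true_eq] at h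
  obtain ⟨x, hx, ⟨hlen, h1⟩, h2⟩ := h
  simp only [Bool.not_eq_eq_eq_not, Bool.not_true, List.isEmpty_eq_false_iff_exists_mem]
  exact ⟨x, List.mem_filter.mpr ⟨hx, by rw [Bool.and_eq_true]; exact ⟨h1, h2⟩⟩⟩

-- B = "every required pair is covered"
theorem b_iff_allCov (candidates : List (List String)) (line_parts : List String) :
    pairwise_covered_alt candidates line_parts = true ↔
      ∀ i < line_parts.length - 1, ∀ j, i < j → j < line_parts.length →
        pvCov candidates line_parts i j = true := by
  unfold pairwise_covered_alt
  simp only [List.all_eq_true, List.mem_range, List.mem_range', one_mul]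
  constructor
  · intro h i hi j hij hj
    rw [← contains_eq_cov candidates line_parts i j hij hj]
    exact h i hi j ⟨j - (i + 1), by omega, by omega⟩
  · rintro h i hi j ⟨k, hk, rfl⟩
    rw [contains_eq_cov candidates line_parts i (i + 1 + k) (by omega) (by omega)]
    exact h i hi _ (by omega) (by omega)

-- A = "every required pair is covered", given Pre_
theorem a_iff_allCov (candidates : List (List String)) (line_parts : List String)
    (hPre : Pre_pairwise_covered candidates line_parts) :
    pairwise_covered candidates line_parts = true ↔
      ∀ i < line_parts.length - 1, ∀ j, i < j → j < line_parts.length →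
        pvCov candidates line_parts i j = true := by
  unfold pairwise_covered
  simp only [List.all_eq_true, List.mem_range, List.mem_range', one_mul]
  constructor
  · intro h
    by_contra hnc
    push Not at hnc
    -- take the lexicographically least uncovered pair (i0, j0)
    have hQ : ∃ i, i < line_parts.length - 1 ∧ ∃ j, j < line_parts.length ∧ i < j ∧
        pvCov candidates line_parts i j = false := by
      obtain ⟨i, hi, j, hij, hj, hc⟩ := hnc
      exact ⟨i, hi, j, hj, hij, by simpa using hc⟩
    set i0 := Nat.find hQ with hi0def
    obtain ⟨hi0, hR⟩ := Nat.find_spec hQ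
    set j0 := Nat.find hR with hj0def
    obtain ⟨hj0, hij0, hcov0⟩ := Nat.find_spec hR
    -- every lexicographically earlier required pair is covered
    have hmin : ∀ i' < line_parts.length - 1, ∀ j', i' < j' → j' < line_parts.length →
        (i' < i0 ∨ (i' = i0 ∧ j' < j0)) → pvCov candidates line_parts i' j' = true := by
      intro i' hi' j' hij' hj' hlex
      by_contra hc
      rcases hlex with hlt | ⟨rfl, hjlt⟩
      · exact Nat.find_min hQ hlt ⟨hi', j', hj', hij', by simpa using hc⟩
      · exact Nat.find_min hR hjlt ⟨hj', hij', by simpa using hc⟩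
    -- the pair (i0, j0) cannot raise, by Pre_
    have hbad : pvBad candidates line_parts i0 j0 = false := by
      by_contra hb
      obtain ⟨i', hi'm, j', hj'm, hlex, hb', hc'⟩ :=
        hPre i0 (List.mem_range.mpr hi0)
          j0 (List.mem_range'.mpr ⟨j0 - (i0 + 1), by omega, by omega⟩)
          (by simpa using hb)
      have hi' : i' < line_parts.length - 1 := List.mem_range.mp hi'm
      obtain ⟨k', hk', hj'e⟩ := List.mem_range'.mp hj'm
      rw [hmin i' hi' j' (by omega) (by omega) hlex] at hc'
      exact absurd hc' (by simp)
    have := h i0 hi0 j0 ⟨j0 - (i0 + 1), by omega, by omega⟩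
    rw [testA_eq_cov candidates line_parts i0 j0 hbad, hcov0] at this
    exact absurd this (by simp)
  · rintro h i hi j ⟨k, hk, rfl⟩
    exact cov_imp_testA candidates line_parts i (i + 1 + k)
      (h i hi _ (by omega) (by omega))

-- ===== VERDICT (by name: the statement is the Claim_ definition above) =====
theorem pairwise_covered_spec : Claim_equal_pairwise_covered := by
  intro candidates line_parts _hDom hPre
  unfold Spec_pairwise_covered
  rw [Bool.eq_iff_iff, a_iff_allCov candidates line_parts hPre, b_iff_allCov]
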